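-- pv_equiv track=rewrite | github.com/gschramm/pyparallelproj | pyparallelproj/wrapper.py | calc_chunks
-- ===== SOURCE A (Python) =====
-- def calc_chunks(nLORs, n_chunks):
--     """ calculate indices to split an array of length nLORs into n_chunks chunks
--
--         example: splitting an array of length 10 into 3 chunks returns [0,4,7,10]
--     """
--     rem = nLORs % n_chunks
--     div = (nLORs // n_chunks)
--
--     chunks = [0]
--
--     for i in range(n_chunks):
--         if i < rem:
--             nLORs_chunck = div + 1
--         else:
--             nLORs_chunck = div
--
--         chunks.append(chunks[i] + nLORs_chunck)
--
--     return chunks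
-- ===== SOURCE B (Python) =====
-- def calc_chunks(nLORs, n_chunks):
--     """ calculate indices to split an array of length nLORs into n_chunks chunks
--
--         example: splitting an array of length 10 into 3 chunks returns [0,4,7,10]
--     """
--     div = nLORs // n_chunks
--     rem = nLORs % n_chunks
--     return [0] + [(i + 1) * div + min(i + 1, rem) for i in range(n_chunks)]
-- ===== Notes on version B (the rewrite author's own statement) =====
-- stated objective: simpler
-- what changed: Replaced the running-accumulator loop (each boundary built from the previous one via chunks[i]) by an independent closed-form expression i*div + min(i, rem) per boundary.
import Mathlib
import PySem

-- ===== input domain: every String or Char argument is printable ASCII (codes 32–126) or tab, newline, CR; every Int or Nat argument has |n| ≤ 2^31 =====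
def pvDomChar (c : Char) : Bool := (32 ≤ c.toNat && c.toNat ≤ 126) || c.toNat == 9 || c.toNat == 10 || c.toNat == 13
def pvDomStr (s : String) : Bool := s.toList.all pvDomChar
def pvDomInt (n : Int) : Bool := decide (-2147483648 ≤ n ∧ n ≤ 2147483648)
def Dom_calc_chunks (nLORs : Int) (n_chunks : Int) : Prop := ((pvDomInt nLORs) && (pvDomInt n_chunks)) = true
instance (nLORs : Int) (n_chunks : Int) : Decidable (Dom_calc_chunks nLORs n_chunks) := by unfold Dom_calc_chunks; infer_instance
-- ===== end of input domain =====

-- B replaces A's running accumulator (each boundary built from the previous via chunks[i])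
-- by an independent closed-form expression per boundary; objective: simpler.

-- ===== PORT A =====
def calc_chunks (nLORs : Int) (n_chunks : Int) : List Int :=
  let rem := PySem.Int.mod nLORs n_chunks
  let dv := PySem.Int.floordiv nLORs n_chunks
  (PySem.List.pyRange 0 n_chunks 1).foldl
    (fun chunks i =>
      let nLORs_chunck := if i < rem then dv + 1 else dv
      chunks ++ [PySem.List.pyGetD chunks i 0 + nLORs_chunck])
    [0]

-- ===== PORT B =====
def calc_chunks_alt (nLORs : Int) (n_chunks : Int) : List Int :=
  let dv := PySem.Int.floordiv nLORs n_chunks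
  let rem := PySem.Int.mod nLORs n_chunks
  0 :: (PySem.List.pyRange 0 n_chunks 1).map (fun i => (i + 1) * dv + min (i + 1) rem)

-- ===== PRECONDITION & SPEC =====
-- Pre_ excludes only n_chunks = 0, where Python A raises ZeroDivisionError.
def Pre_calc_chunks (_nLORs : Int) (n_chunks : Int) : Prop := n_chunks ≠ 0
instance (nLORs : Int) (n_chunks : Int) : Decidable (Pre_calc_chunks nLORs n_chunks) := by unfold Pre_calc_chunks; infer_instance
def pvWitness_calc_chunks : Int × Int := (10, 3)

def Spec_calc_chunks (nLORs : Int) (n_chunks : Int) (out : List Int) : Prop := out = calc_chunks_alt nLORs n_chunks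
instance (nLORs : Int) (n_chunks : Int) (out : List Int) : Decidable (Spec_calc_chunks nLORs n_chunks out) := by unfold Spec_calc_chunks; infer_instance

-- ===== CLAIM (what is proved, stated in full; the proofs are below) =====
def Claim_equal_calc_chunks : Prop := ∀ (nLORs : Int) (n_chunks : Int), Dom_calc_chunks nLORs n_chunks → Pre_calc_chunks nLORs n_chunks → Spec_calc_chunks nLORs n_chunks (calc_chunks nLORs n_chunks)

-- ===== LEMMAS AND PROOFS =====

-- A's loop, run over range(0, m), produces exactly the closed-form boundaries j*d + min j r.
lemma loop_closed_form (d r : Int) (hr : 0 ≤ r) : ∀ (m : Nat),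
    (PySem.List.pyRange 0 (m : Int) 1).foldl
      (fun chunks i =>
        let nLORs_chunck := if i < r then d + 1 else d
        chunks ++ [PySem.List.pyGetD chunks i 0 + nLORs_chunck])
      [0]
    = (PySem.List.pyRange 0 ((m : Int) + 1) 1).map (fun j => j * d + min j r) := by
  intro m
  induction m with
  | zero =>
      rw [PySem.List.pyRange_one_eq_nil (by norm_num)]
      rw [show ((0:Nat):Int) + 1 = 0 + 1 by norm_num, PySem.List.pyRange_one_singleton]
      simp [List.foldl]
      omega
  | succ m ih =>
      have hm1 : ((m+1:Nat):Int) = (m:Int) + 1 := by push_cast; ring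
      rw [hm1,
          PySem.List.pyRange_one_succ_right (by positivity : (0:Int) ≤ (m:Int)),
          PySem.List.pyRange_one_succ_right (by positivity : (0:Int) ≤ (m:Int) + 1),
          List.foldl_append, List.map_append, ih]
      simp only [List.foldl]
      have hget : PySem.List.pyGetD
          ((PySem.List.pyRange 0 ((m:Int) + 1) 1).map (fun j => j * d + min j r)) (m:Int) 0
          = (m:Int) * d + min (m:Int) r := by
        rw [← hm1]
        exact PySem.List.pyGetD_map_pyRange (fun j => j * d + min j r) (m+1) m 0 (Nat.lt_succ_self m)
      rw [hget]
      have key : (m:Int) * d + min (m:Int) r + (if (m:Int) < r then d + 1 else d)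
          = ((m:Int) + 1) * d + min ((m:Int) + 1) r := by
        rcases lt_or_ge ((m:Int)) r with hlt | hge
        · rw [if_pos hlt, min_eq_left (by omega), min_eq_left (by omega)]; ring
        · rw [if_neg (not_lt.2 hge), min_eq_right (by omega), min_eq_right (by omega)]; ring
      rw [key]
      simp

theorem calc_chunks_spec : Claim_equal_calc_chunks := by
  intro nL nC _ hpre
  unfold Spec_calc_chunks calc_chunks calc_chunks_alt
  dsimp only
  by_cases h : 0 < nC
  · have hr : 0 ≤ PySem.Int.mod nL nC := PySem.Int.mod_nonneg nL h
    have hc : ((nC.toNat : Nat) : Int) = nC := Int.toNat_of_nonneg h.le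
    rw [← hc]
    rw [loop_closed_form (PySem.Int.floordiv nL ((nC.toNat : Nat) : Int))
        (PySem.Int.mod nL ((nC.toNat : Nat) : Int)) (by rw [hc]; exact hr) nC.toNat]
    rw [PySem.List.pyRange_one_cons (by positivity : (0:Int) < ((nC.toNat:Nat):Int) + 1)]
    simp only [List.map_cons]
    have hmin0 : min (0:Int) (PySem.Int.mod nL ((nC.toNat : Nat) : Int)) = 0 :=
      min_eq_left (by rw [hc]; exact hr)
    rw [zero_mul, zero_add, hmin0]
    congr 1
    rw [PySem.List.pyRange_one ((0:Int) + 1) (((nC.toNat:Nat):Int) + 1),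
        PySem.List.pyRange_one 0 ((nC.toNat:Nat):Int), List.map_map, List.map_map]
    rw [show ((nC.toNat:Int) + 1 - (0 + 1)) = ((nC.toNat:Int) - 0) by ring]
    apply List.map_congr_left
    intro k _
    simp only [Function.comp_apply]
    have hsw : (0:Int) + 1 + (k:Int) = (0:Int) + (k:Int) + 1 := by ring
    rw [hsw]
  · have hnil : PySem.List.pyRange 0 nC 1 = [] :=
      PySem.List.pyRange_one_eq_nil (by omega)
    rw [hnil]
    simp [List.foldl]
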